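-- pv_equiv track=rewrite | github.com/judywq/non-repetitive-translation | lib/tag_merge.py | find_non_negative_consecutive_sequences
-- ===== SOURCE A (Python) =====
-- def find_non_negative_consecutive_sequences(lst):
--     # Initialize an empty dictionary to store the sequences and their indices
--     sequences_dict = {}
--
--     # Iterate over the list with an index
--     for i in range(len(lst) - 1):
--         # Skip if the current element is negative
--         if lst[i] < 0:
--             continue
--
--         # Start a potential sequence
--         seq = [lst[i]]
--         # Iterate through the remaining elements to build the sequence
--         for j in range(i + 1, len(lst)):
--             # Check if the next number is non-negative
--             if lst[j] >= 0:
--                 seq.append(lst[j])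
--                 # Convert the sequence list to a tuple to use it as a dictionary key
--                 seq_tuple = tuple(seq)
--                 # Initialize the key in the dictionary if it doesn't exist
--                 if seq_tuple not in sequences_dict:
--                     sequences_dict[seq_tuple] = []
--                 # Append the starting index of the sequence to the dictionary
--                 sequences_dict[seq_tuple].append(i)
--             else:
--                 # Stop if the next number is negative
--                 break
--
--     # Filter out sequences that occur only once
--     filtered_sequences = {seq: indices for seq, indices in sequences_dict.items() if len(indices) > 1}
--
--     return filtered_sequences
-- ===== SOURCE B (Python) =====
-- def find_non_negative_consecutive_sequences(lst):
--     n = len(lst)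
--     # Backward DP: reach[i] = length of the maximal run of non-negative
--     # elements starting at i (reach[n] = 0).
--     reach = [0] * (n + 1)
--     for i in range(n - 1, -1, -1):
--         reach[i] = 0 if lst[i] < 0 else reach[i + 1] + 1
--     d = {}
--     for i in range(n - 1):
--         for L in range(2, reach[i] + 1):
--             t = tuple(lst[i:i + L])
--             d[t] = d.get(t, []) + [i]
--     return {t: idxs for t, idxs in d.items() if len(idxs) > 1}
-- ===== Notes on version B (the rewrite author's own statement) =====
-- stated objective: alternative
-- what changed: Replaces A's per-start forward scan that grows a sequence element-by-element and breaks on a negative with a backward dynamic-programming pass computing the non-negative run length at each index, then materializes each repeated window directly by slicing; the dict is updated with get+rebind instead of A's membership-test-then-mutate.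
import Mathlib
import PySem

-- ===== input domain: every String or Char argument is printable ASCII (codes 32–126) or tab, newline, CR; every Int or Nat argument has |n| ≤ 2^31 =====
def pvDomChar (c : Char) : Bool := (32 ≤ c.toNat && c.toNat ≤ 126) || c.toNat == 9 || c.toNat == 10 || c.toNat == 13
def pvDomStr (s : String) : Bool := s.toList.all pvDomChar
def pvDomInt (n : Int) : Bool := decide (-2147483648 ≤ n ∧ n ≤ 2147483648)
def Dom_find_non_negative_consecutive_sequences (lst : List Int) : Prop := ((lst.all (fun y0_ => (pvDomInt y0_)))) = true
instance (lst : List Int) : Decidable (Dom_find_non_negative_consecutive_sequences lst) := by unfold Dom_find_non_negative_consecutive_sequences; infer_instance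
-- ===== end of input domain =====

-- B replaces A's per-start forward scan (growing a sequence element-by-element, breaking on a
-- negative) by a backward pass of non-negative run lengths plus direct window slicing (objective: alternative).


-- ===== PORT A =====
-- A's inner 'for j in range(i+1, len(lst)): … else: break' loop, as structural recursion on j
def aInner (lst : List Int) (i j : Int) (seq : List Int)
    (d : PySem.Dict (List Int) (List Int)) : PySem.Dict (List Int) (List Int) :=
  if _h : j < (lst.length : Int) then
    if 0 ≤ PySem.List.pyGetD lst j 0 then
      let seq' := seq ++ [PySem.List.pyGetD lst j 0]
      let d' := if d.contains seq' = false then d.insert seq' [] else d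
      aInner lst i (j + 1) seq' (d'.modify seq' [] (fun v => v ++ [i]))
    else d
  else d
termination_by ((lst.length : Int) - j).toNat
decreasing_by omega

def find_non_negative_consecutive_sequences (lst : List Int) : List (List Int × List Int) :=
  let sequences_dict :=
    (PySem.List.pyRange 0 ((lst.length : Int) - 1) 1).foldl
      (fun d i =>
        if PySem.List.pyGetD lst i 0 < 0 then d
        else aInner lst i (i + 1) [PySem.List.pyGetD lst i 0] d)
      PySem.Dict.empty
  sequences_dict.items.filter (fun p => p.2.length > 1)

-- ===== PORT B =====
-- B's backward pass 'for i in range(n-1,-1,-1): reach[i] = 0 if lst[i]<0 else reach[i+1]+1' (reach[n]=0)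
def altReach (lst : List Int) : List Int :=
  lst.foldr (fun x acc => (if x < 0 then 0 else acc.headD 0 + 1) :: acc) [0]

def find_non_negative_consecutive_sequences_alt (lst : List Int) : List (List Int × List Int) :=
  let reach := altReach lst
  let d :=
    (PySem.List.pyRange 0 ((lst.length : Int) - 1) 1).foldl
      (fun d i =>
        (PySem.List.pyRange 2 (PySem.List.pyGetD reach i 0 + 1) 1).foldl
          (fun d L =>
            let t := PySem.List.slice lst (some i) (some (i + L))
            d.insert t (d.getD t [] ++ [i]))
          d)
      PySem.Dict.empty
  d.items.filter (fun p => p.2.length > 1)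

-- ===== PRECONDITION & SPEC =====
def Spec_find_non_negative_consecutive_sequences (lst : List Int) (out : List (List Int × List Int)) : Prop := out = find_non_negative_consecutive_sequences_alt lst
instance (lst : List Int) (out : List (List Int × List Int)) : Decidable (Spec_find_non_negative_consecutive_sequences lst out) := by unfold Spec_find_non_negative_consecutive_sequences; infer_instance

-- ===== CLAIM (what is proved, stated in full; the proofs are below) =====
def Claim_equal_find_non_negative_consecutive_sequences : Prop := ∀ (lst : List Int), Dom_find_non_negative_consecutive_sequences lst → Spec_find_non_negative_consecutive_sequences lst (find_non_negative_consecutive_sequences lst)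

-- ===== LEMMAS AND PROOFS =====

-- length of the maximal run of non-negative elements of lst starting at index j
def chain (lst : List Int) (j : Nat) : Nat :=
  if h : j < lst.length then (if lst[j] < 0 then 0 else chain lst (j + 1) + 1) else 0
termination_by lst.length - j

-- the keys both programs record while processing start index i
def keysFor (lst : List Int) (i : Nat) : List (List Int) :=
  (List.range (chain lst i - 1)).map (fun m => (lst.drop i).take (m + 2))

-- the common per-key dict update: d[k] = d.get(k, []) + [i]
def dstep (i : Int) (d : PySem.Dict (List Int) (List Int)) (k : List Int) :
    PySem.Dict (List Int) (List Int) :=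
  d.modify k [] (fun v => v ++ [i])

lemma chain_cons_succ (x : Int) (xs : List Int) (j : Nat) :
    chain (x :: xs) (j + 1) = chain xs j := by
  induction hn : xs.length - j generalizing j with
  | zero =>
    conv_lhs => rw [chain]
    conv_rhs => rw [chain]
    have h : ¬ j < xs.length := by omega
    simp [h, show ¬ (j + 1 < xs.length + 1) by omega]
  | succ n ih =>
    conv_lhs => rw [chain]
    conv_rhs => rw [chain]
    have h : j < xs.length := by omega
    have h1 : j + 1 < (x :: xs).length := by simp; omega
    simp only [h, h1, dif_pos]
    have h2 : (x :: xs)[j + 1] = xs[j] := by simp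
    rw [h2, ih (j + 1) (by omega)]

lemma chain_eq_zero (lst : List Int) (j : Nat) (h : ¬ (j < lst.length ∧ 0 ≤ lst.getD j 0)) :
    chain lst j = 0 := by
  rw [chain]
  by_cases hj : j < lst.length
  · have h3 : lst[j] < 0 := by
      have := List.getD_eq_getElem lst 0 hj
      omega
    simp [hj, h3]
  · simp [hj]

lemma chain_succ (lst : List Int) (j : Nat) (hj : j < lst.length) (hx : 0 ≤ lst[j]) :
    chain lst j = chain lst (j + 1) + 1 := by
  rw [chain]; simp only [hj, dif_pos]; rw [if_neg (by omega)]

-- A's 'if absent insert []; then append' is the single update dstep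
lemma stepA_collapse (d : PySem.Dict (List Int) (List Int)) (k : List Int) (i : Int) :
    ((if d.contains k = false then d.insert k [] else d).modify k [] (fun v => v ++ [i]))
      = d.modify k [] (fun v => v ++ [i]) := by
  by_cases h : d.contains k = false
  · simp only [h, if_pos, PySem.Dict.modify]
    rw [PySem.Dict.getD_insert_self, PySem.Dict.insert_insert_self,
        PySem.Dict.getD_of_not_contains d [] h]
  · simp [h]

lemma aInner_eq_foldl (lst : List Int) (i : Int) :
    ∀ (c : Nat) (j : Nat) (seq : List Int) (d : PySem.Dict (List Int) (List Int)),
      chain lst j = c →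
      aInner lst i (j : Int) seq d
        = ((List.range c).map (fun m => seq ++ (lst.drop j).take (m + 1))).foldl (dstep i) d := by
  intro c
  induction c with
  | zero =>
    intro j seq d hc
    rw [aInner]
    by_cases hj : j < lst.length
    · have hneg : lst[j] < 0 := by
        by_contra hx
        rw [chain_succ lst j hj (by omega)] at hc
        omega
      have hg : PySem.List.pyGetD lst (j : Int) 0 = lst[j] := by
        rw [PySem.List.pyGetD_natCast]
        exact List.getD_eq_getElem lst 0 hj
      simp [hj, hg, show ¬ (0 ≤ lst[j]) by omega]
    · simp [show ¬ ((j : Int) < (lst.length : Int)) by exact_mod_cast hj]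
  | succ c ih =>
    intro j seq d hc
    have hj : j < lst.length := by
      by_contra hx
      rw [chain_eq_zero lst j (by tauto)] at hc; omega
    have hg : PySem.List.pyGetD lst (j : Int) 0 = lst[j] := by
      rw [PySem.List.pyGetD_natCast]; exact List.getD_eq_getElem lst 0 hj
    have hx : 0 ≤ lst[j] := by
      by_contra hneg
      rw [chain_eq_zero lst j (by rw [List.getD_eq_getElem lst 0 hj]; omega)] at hc; omega
    have hc' : chain lst (j + 1) = c := by
      rw [chain_succ lst j hj hx] at hc; omega
    rw [aInner]
    have hjc : (j : Int) < (lst.length : Int) := by exact_mod_cast hj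
    simp only [hjc, dif_pos, hg, hx, if_pos]
    have hdrop : lst.drop j = lst[j] :: lst.drop (j + 1) := List.drop_eq_getElem_cons hj
    have hcast : ((j : Int) + 1) = ((j + 1 : Nat) : Int) := by push_cast; ring
    rw [hcast, ih (j + 1) (seq ++ [lst[j]]) _ hc']
    rw [List.range_succ_eq_map, List.map_cons, List.map_map, List.foldl_cons]
    congr 1
    · simp only [dstep]
      rw [hdrop]
      simp only [Nat.zero_add, List.take_succ_cons, List.take_zero]
      exact stepA_collapse d _ i
    · apply List.map_congr_left
      intro m _
      simp only [Function.comp]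
      rw [hdrop, List.take_succ_cons]
      simp [List.append_assoc]

lemma A_body (lst : List Int) (d : PySem.Dict (List Int) (List Int)) (i : Nat)
    (hi : i < lst.length) :
    (if PySem.List.pyGetD lst (i : Int) 0 < 0 then d
     else aInner lst i ((i : Int) + 1) [PySem.List.pyGetD lst (i : Int) 0] d)
      = (keysFor lst i).foldl (dstep i) d := by
  have hg : PySem.List.pyGetD lst (i : Int) 0 = lst[i] := by
    rw [PySem.List.pyGetD_natCast]; exact List.getD_eq_getElem lst 0 hi
  rw [hg]
  by_cases hneg : lst[i] < 0
  · rw [if_pos hneg]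
    have : chain lst i = 0 := by
      apply chain_eq_zero; rw [List.getD_eq_getElem lst 0 hi]; omega
    simp [keysFor, this]
  · rw [if_neg hneg]
    have hcast : ((i : Int) + 1) = ((i + 1 : Nat) : Int) := by push_cast; ring
    rw [hcast, aInner_eq_foldl lst (i : Int) (chain lst (i + 1)) (i + 1) _ d rfl]
    have hc : chain lst i = chain lst (i + 1) + 1 := chain_succ lst i hi (by omega)
    have hdrop : lst.drop i = lst[i] :: lst.drop (i + 1) := List.drop_eq_getElem_cons hi
    unfold keysFor
    rw [hc]
    congr 1
    apply List.map_congr_left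
    intro m _
    rw [hdrop, List.take_succ_cons]
    simp

lemma altReach_eq' (lst : List Int) :
    lst.foldr (fun x acc => (if x < 0 then 0 else acc.headD 0 + 1) :: acc) [0]
      = (List.range (lst.length + 1)).map (fun i => (chain lst i : Int)) := by
  induction lst with
  | nil =>
    simp
    rw [chain]; simp
  | cons x xs ih =>
    simp only [List.foldr_cons, ih]
    have hch : chain (x :: xs) 0 = if x < 0 then 0 else chain xs 0 + 1 := by
      rw [chain]
      simp only [List.length_cons, Nat.succ_pos, dif_pos, List.getElem_cons_zero]
      rw [show (0:Nat) + 1 = 1 from rfl, chain_cons_succ x xs 0]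
      split_ifs <;> rfl
    have hhead : ((List.range (xs.length + 1)).map (fun i => (chain xs i : Int))).headD 0
        = (chain xs 0 : Int) := by
      rw [List.range_succ_eq_map]
      simp
    rw [hhead]
    conv_rhs => rw [show (x :: xs).length + 1 = ((x :: xs).length) + 1 from rfl,
      List.range_succ_eq_map]
    simp only [List.map_cons, List.map_map]
    congr 1
    · rw [hch]
      split_ifs <;> simp
    · simp only [List.length_cons]
      apply List.map_congr_left
      intro m _
      simp [Function.comp, chain_cons_succ]

lemma B_body (lst : List Int) (d : PySem.Dict (List Int) (List Int)) (i : Nat)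
    (hi : i < lst.length) :
    (PySem.List.pyRange 2 (PySem.List.pyGetD (altReach lst) (i : Int) 0 + 1) 1).foldl
        (fun d L =>
          let t := PySem.List.slice lst (some (i : Int)) (some ((i : Int) + L))
          d.insert t (d.getD t [] ++ [(i : Int)]))
        d
      = (keysFor lst i).foldl (dstep i) d := by
  have hr : PySem.List.pyGetD (altReach lst) (i : Int) 0 = (chain lst i : Int) := by
    rw [PySem.List.pyGetD_natCast]
    unfold altReach
    rw [altReach_eq']
    exact PySem.List.getD_map_range _ _ _ _ (by omega)
  rw [hr]
  rw [PySem.List.pyRange_one]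
  have hlen : ((chain lst i : Int) + 1 - 2).toNat = chain lst i - 1 := by omega
  rw [hlen]
  unfold keysFor
  rw [List.foldl_map, List.foldl_map]
  apply PySem.List.foldl_congr_mem
  intro acc m _
  have hslice : PySem.List.slice lst (some (i : Int)) (some ((i : Int) + (2 + (m : Int))))
      = (lst.drop i).take (m + 2) := by
    have : (i : Int) + (2 + (m : Int)) = (i : Int) + ((m + 2 : Nat) : Int) := by push_cast; ring
    rw [this]
    exact PySem.List.slice_natCast_add lst i (m + 2)
  simp only [hslice, dstep, PySem.Dict.modify]

-- ===== VERDICT (by name: the statement is the Claim_ definition above) =====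
theorem find_non_negative_consecutive_sequences_spec : Claim_equal_find_non_negative_consecutive_sequences := by
  intro lst _
  unfold Spec_find_non_negative_consecutive_sequences
  unfold find_non_negative_consecutive_sequences find_non_negative_consecutive_sequences_alt
  simp only []
  congr 1
  congr 1
  rw [PySem.List.pyRange_one, List.foldl_map, List.foldl_map]
  apply PySem.List.foldl_congr_mem
  intro acc m hm
  have hm' : m < lst.length := by
    have := List.mem_range.mp hm
    omega
  simp only [show (0:Int) + (m:Int) = ((m:Nat):Int) from by ring]
  rw [A_body lst acc m hm', B_body lst acc m hm']
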